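-- pv_equiv track=rewrite | github.com/AbbasDagg/NLP-File-Prediction---Part1 | processing_knesset_corpus.py | get_next_word
-- ===== SOURCE A (Python) =====
-- def get_next_word(text, position):
--     # Find the start of the next word
--     word_start = position
--
--
--     while word_start < len(text) and text[word_start].isspace(): # Skip spaces
--         word_start += 1
--
--     # If reached the end of the text, return empty
--     if word_start >= len(text):
--         return "-1"
--
--     # Find the end of the next word
--     word_end = word_start
--     while word_end < len(text) and not text[word_end].isspace():
--         word_end += 1
--
--     # Return the next continuous word
--     return text[word_start:word_end]
-- ===== SOURCE B (Python) =====
-- def get_next_word(text, position):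
--     parts = text[position:].split(None, 1)
--     return parts[0] if parts else "-1"
-- ===== Notes on version B (the rewrite author's own statement) =====
-- stated objective: simpler
-- what changed: Replaces A's two manual index-advancing character loops (skip whitespace, then scan the word) with a single slice plus the builtin whitespace tokenizer str.split(None, 1) (C-level, hence a large constant-factor speedup), falling back to "-1" when no word remains.
-- outside the precondition, e.g. on get_next_word(' a b ', -1): A returns 'a', B returns '-1'; on get_next_word('a', -5): A raises IndexError, B returns 'a'
import Mathlib
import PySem

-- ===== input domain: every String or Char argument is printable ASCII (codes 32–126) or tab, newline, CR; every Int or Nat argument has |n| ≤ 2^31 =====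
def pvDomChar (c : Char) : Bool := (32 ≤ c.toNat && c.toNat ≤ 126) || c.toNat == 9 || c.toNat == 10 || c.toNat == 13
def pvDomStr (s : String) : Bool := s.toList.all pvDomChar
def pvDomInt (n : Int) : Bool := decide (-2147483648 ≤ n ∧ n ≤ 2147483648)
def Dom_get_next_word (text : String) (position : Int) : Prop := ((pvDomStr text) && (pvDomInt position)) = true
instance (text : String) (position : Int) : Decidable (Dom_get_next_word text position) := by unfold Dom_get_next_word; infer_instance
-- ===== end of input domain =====

-- B replaces A's two manual index-advancing character loops with one slice plus the builtin
-- whitespace tokenizer split(None, 1); objective: simpler.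

-- ===== PORT A =====
-- while word_start < len(text) and text[word_start].isspace(): word_start += 1
def pvSkipWS (cs : List Char) (i : Int) : Int :=
  if h : i < (cs.length : Int) ∧ PySem.Chars.isspace (PySem.List.pyGetD cs i ' ') = true then
    pvSkipWS cs (i + 1)
  else i
termination_by ((cs.length : Int) - i).toNat
decreasing_by omega

-- while word_end < len(text) and not text[word_end].isspace(): word_end += 1
def pvFindEnd (cs : List Char) (i : Int) : Int :=
  if h : i < (cs.length : Int) ∧ ¬ PySem.Chars.isspace (PySem.List.pyGetD cs i ' ') = true then
    pvFindEnd cs (i + 1)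
  else i
termination_by ((cs.length : Int) - i).toNat
decreasing_by omega

def get_next_word (text : String) (position : Int) : String :=
  let cs := text.toList
  let word_start := pvSkipWS cs position
  if word_start ≥ (cs.length : Int) then "-1"
  else
    let word_end := pvFindEnd cs word_start
    String.ofList (PySem.List.slice cs (some word_start) (some word_end))

-- ===== PORT B =====
-- parts = text[position:].split(None, 1); return parts[0] if parts else "-1"
def get_next_word_alt (text : String) (position : Int) : String :=
  let parts := PySem.Str.split₀Max (PySem.Str.slice text (some position) none) 1
  match parts with
  | [] => "-1"
  | w :: _ => w

-- ===== PRECONDITION & SPEC =====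
-- Pre_ excludes negative positions: for position < -len(text) A raises IndexError, and for
-- in-range negative positions Python's negative-index wraparound makes A's loops and B's slice
-- start at different places, so neither value is specified for this purpose.
def Pre_get_next_word (_text : String) (position : Int) : Prop := 0 ≤ position
instance (text : String) (position : Int) : Decidable (Pre_get_next_word text position) := by unfold Pre_get_next_word; infer_instance

def pvWitness_get_next_word : String × Int := ("  hello world", 1)

def Spec_get_next_word (text : String) (position : Int) (out : String) : Prop := out = get_next_word_alt text position
instance (text : String) (position : Int) (out : String) : Decidable (Spec_get_next_word text position out) := by unfold Spec_get_next_word; infer_instance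

-- ===== CLAIM (what is proved, stated in full; the proofs are below) =====
def Claim_equal_get_next_word : Prop := ∀ (text : String) (position : Int), Dom_get_next_word text position → Pre_get_next_word text position → Spec_get_next_word text position (get_next_word text position)

-- ===== LEMMAS AND PROOFS =====

lemma pv_dropWhile_eq_drop (l : List Char) (p : Char → Bool) :
    l.dropWhile p = l.drop (l.takeWhile p).length := by
  induction l with
  | nil => rfl
  | cons a t ih => by_cases h : p a <;> simp [h, ih]

lemma pv_take_takeWhile (l : List Char) (p : Char → Bool) :
    l.take (l.takeWhile p).length = l.takeWhile p := by
  induction l with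
  | nil => rfl
  | cons a t ih => by_cases h : p a <;> simp [h, ih]

lemma pvSkipWS_eq (fuel : Nat) (cs : List Char) (j : Nat) (hf : cs.length - j ≤ fuel) :
    pvSkipWS cs (j : Int) = (j : Int) + (((cs.drop j).takeWhile PySem.Chars.isspace).length : Int) := by
  induction fuel generalizing j with
  | zero =>
    have hj : cs.length ≤ j := by omega
    rw [pvSkipWS]
    rw [dif_neg (by push_cast; omega)]
    simp [List.drop_eq_nil_of_le hj]
  | succ n ih =>
    rw [pvSkipWS]
    by_cases hlt : j < cs.length
    · have hd : cs.drop j = cs[j] :: cs.drop (j + 1) := List.drop_eq_getElem_cons hlt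
      have hget : PySem.List.pyGetD cs (j : Int) ' ' = cs[j] := by
        simp [PySem.List.pyGetD_natCast, List.getElem?_eq_getElem hlt]
      by_cases hsp : PySem.Chars.isspace cs[j] = true
      · rw [dif_pos ⟨by push_cast; omega, by rw [hget]; exact hsp⟩]
        have : ((j : Int) + 1) = ((j + 1 : Nat) : Int) := by push_cast; ring
        rw [this, ih (j + 1) (by omega)]
        rw [hd, List.takeWhile_cons, if_pos hsp]
        simp only [List.length_cons]; push_cast; omega
      · rw [dif_neg (by rw [hget]; tauto)]
        rw [hd, List.takeWhile_cons, if_neg hsp]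
        simp
    · rw [dif_neg (by push_cast; omega)]
      simp [List.drop_eq_nil_of_le (by omega : cs.length ≤ j)]

lemma pvFindEnd_eq (fuel : Nat) (cs : List Char) (j : Nat) (hf : cs.length - j ≤ fuel) :
    pvFindEnd cs (j : Int) = (j : Int) + (((cs.drop j).takeWhile (fun c => !PySem.Chars.isspace c)).length : Int) := by
  induction fuel generalizing j with
  | zero =>
    have hj : cs.length ≤ j := by omega
    rw [pvFindEnd]
    rw [dif_neg (by push_cast; omega)]
    simp [List.drop_eq_nil_of_le hj]
  | succ n ih =>
    rw [pvFindEnd]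
    by_cases hlt : j < cs.length
    case neg =>
      rw [dif_neg (by rintro ⟨h1, _⟩; omega)]
      simp [List.drop_eq_nil_of_le (by omega : cs.length ≤ j)]
    · have hd : cs.drop j = cs[j] :: cs.drop (j + 1) := List.drop_eq_getElem_cons hlt
      have hget : PySem.List.pyGetD cs (j : Int) ' ' = cs[j] := by
        simp [PySem.List.pyGetD_natCast, List.getElem?_eq_getElem hlt]
      by_cases hsp : PySem.Chars.isspace cs[j] = true
      · rw [dif_neg (by rw [hget]; tauto)]
        rw [hd, List.takeWhile_cons]
        simp [hsp]
      · rw [dif_pos ⟨by push_cast; omega, by rw [hget]; exact hsp⟩]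
        have : ((j : Int) + 1) = ((j + 1 : Nat) : Int) := by push_cast; ring
        rw [this, ih (j + 1) (by omega)]
        rw [hd, List.takeWhile_cons]
        simp only [hsp, Bool.not_false, if_pos]
        simp only [List.length_cons]; push_cast; omega

lemma pv_go_head (fuel : Nat) (hf : 1 ≤ fuel) (l : List Char) (w : List Char) :
    ∃ tl, PySem.Chars.split₀Max.go fuel 0 l [w] = w :: tl := by
  obtain ⟨n, rfl⟩ : ∃ n, fuel = n + 1 := ⟨fuel - 1, by omega⟩
  rw [PySem.Chars.split₀Max.go]
  cases h : l.dropWhile PySem.Chars.isspace with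
  | nil => exact ⟨[], by simp⟩
  | cons a t => exact ⟨[a :: t], by simp⟩

lemma pv_split0Max_one (l : List Char) :
    (PySem.Chars.split₀Max l 1 = [] ∧ l.dropWhile PySem.Chars.isspace = []) ∨
    (∃ tl, PySem.Chars.split₀Max l 1 =
        ((l.dropWhile PySem.Chars.isspace).takeWhile (fun c => !PySem.Chars.isspace c)) :: tl ∧
      l.dropWhile PySem.Chars.isspace ≠ []) := by
  rw [PySem.Chars.split₀Max]
  rw [if_neg (by norm_num)]
  have h1 : (1 : Int).toNat = 1 := rfl
  rw [h1]
  rw [PySem.Chars.split₀Max.go]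
  cases h : l.dropWhile PySem.Chars.isspace with
  | nil => exact Or.inl ⟨by simp, rfl⟩
  | cons a t =>
    right
    have hlen : 1 ≤ l.length := by
      rcases l with _ | _
      · simp at h
      · simp
    simp only []
    obtain ⟨tl, htl⟩ := pv_go_head l.length hlen
      ((a :: t).dropWhile (fun c => !PySem.Chars.isspace c))
      ((a :: t).takeWhile (fun c => !PySem.Chars.isspace c))
    exact ⟨tl, by simpa using htl, by simp⟩

-- ===== VERDICT (by name: the statement is the Claim_ definition above) =====
theorem get_next_word_spec : Claim_equal_get_next_word := by
  intro text position _ hpre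
  unfold Spec_get_next_word
  unfold Pre_get_next_word at hpre
  obtain ⟨p, rfl⟩ : ∃ p : Nat, position = (p : Int) := ⟨position.toNat, by omega⟩
  unfold get_next_word get_next_word_alt
  simp only [PySem.Str.split₀Max]
  set cs := text.toList with hcs
  have hrest : (PySem.Str.slice text (some (p : Int)) none).toList = cs.drop p := by
    simp [PySem.List.slice_from_natCast, ← hcs]
  rw [hrest]
  set d := cs.drop p with hd
  set k := (d.takeWhile PySem.Chars.isspace).length with hk
  set s := d.dropWhile PySem.Chars.isspace with hs
  have hws : pvSkipWS cs (p : Int) = ((p + k : Nat) : Int) := by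
    rw [pvSkipWS_eq (cs.length - p) cs p (le_refl _)]
    push_cast; ring
  have hsk : cs.drop (p + k) = s := by
    rw [← List.drop_drop, ← hd, hs, hk, pv_dropWhile_eq_drop]
  have hklen : k ≤ d.length := by rw [hk]; exact List.IsPrefix.length_le (List.takeWhile_prefix _)
  have hdlen : d.length = cs.length - p := by rw [hd]; simp
  have hslen : s.length = d.length - k := by rw [← hsk, hk]; simp [hdlen]; omega
  rw [hws]
  rcases pv_split0Max_one d with ⟨h0, hnil⟩ | ⟨tl, heq, hne⟩
  · -- no word remains: A's word_start reached the end, B's split is empty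
    rw [← hs] at hnil
    have : cs.length ≤ p + k := by
      have : s.length = 0 := by rw [hnil]; rfl
      omega
    rw [if_pos (by push_cast; omega), h0]
    rfl
  · -- a word remains
    rw [← hs] at heq hne
    have hlt : p + k < cs.length := by
      have : 0 < s.length := List.length_pos_of_ne_nil hne
      omega
    rw [if_neg (by push_cast; omega), heq]
    have hwe : pvFindEnd cs ((p + k : Nat) : Int) =
        ((p + k : Nat) : Int) + ((s.takeWhile (fun c => !PySem.Chars.isspace c)).length : Int) := by
      rw [pvFindEnd_eq (cs.length - (p + k)) cs (p + k) (le_refl _), hsk]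
    rw [hwe, PySem.List.slice_natCast_add, hsk, pv_take_takeWhile]
    rfl
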